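-- pv_equiv track=rewrite | github.com/foolishzhao/leetcode | python3/weekly-contest-175/_5335_Maximum_Students_Taking_Exam/main.py | maxStudents2
-- ===== SOURCE A (Python) =====
-- from typing import List
--
-- def maxStudents2(seats: List[List[str]]) -> int:
--     m, n = len(seats), len(seats[0])
--     rows = list()
--     for i in range(m):
--         cur = 0
--         for j in range(n):
--             cur = (cur << 1) | (seats[i][j] == '.')
--         rows.append(cur)
--
--     def countBits(n):
--         res = 0
--         while n:
--             res += 1
--             n = n & (n - 1)
--         return res
--
--     dp = [[-1] * (1 << n) for _ in range(m + 1)]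
--     dp[0][0] = 0
--     for i in range(1, m + 1):
--         row = rows[i - 1]
--         for j in range(1 << n):
--             if (j & row) == j and not (j & (j >> 1)):
--                 for k in range(1 << n):
--                     if not (j & (k >> 1)) and not ((j >> 1) & k) and dp[i - 1][k] != -1:
--                         dp[i][j] = max(dp[i][j], dp[i - 1][k] + countBits(j))
--
--     return max(dp[-1])
-- ===== SOURCE B (Python) =====
-- from typing import List
--
-- def maxStudents2(seats: List[List[str]]) -> int:
--     n = len(seats[0])
--     # All bitmasks of width n with no two adjacent set bits, paired with their
--     # popcount, built once Fibonacci-style (in increasing mask order).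
--     a, b = [(0, 0)], [(0, 0), (1, 1)]
--     if n == 0:
--         valid = a
--     else:
--         for i in range(2, n + 1):
--             a, b = b, b + [(m | (1 << (i - 1)), c + 1) for (m, c) in a]
--         valid = b
--     # DP keyed only by the reachable valid masks of the previous row.
--     prev = {0: 0}
--     for r in seats:
--         allowed = 0
--         for j in range(n):
--             allowed = (allowed << 1) | (r[j] == '.')
--         cur = {}
--         for m, c in valid:
--             if m & allowed == m:
--                 best = max((v for k, v in prev.items()
--                             if not (m & (k >> 1)) and not ((m >> 1) & k)),
--                            default=-1)
--                 cur[m] = best + c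
--         prev = cur
--     return max(prev.values())
-- ===== Notes on version B (the rewrite author's own statement) =====
-- stated objective: faster
-- what changed: Replaces the full (2^n)x(2^n) per-row table scan by a DP keyed only on reachable valid masks: the no-adjacent-bit masks with their popcounts are generated once Fibonacci-style, each row keeps a dict of reachable states, and the inner loop runs over the previous row's dict items instead of all 2^n masks.
import Mathlib
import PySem

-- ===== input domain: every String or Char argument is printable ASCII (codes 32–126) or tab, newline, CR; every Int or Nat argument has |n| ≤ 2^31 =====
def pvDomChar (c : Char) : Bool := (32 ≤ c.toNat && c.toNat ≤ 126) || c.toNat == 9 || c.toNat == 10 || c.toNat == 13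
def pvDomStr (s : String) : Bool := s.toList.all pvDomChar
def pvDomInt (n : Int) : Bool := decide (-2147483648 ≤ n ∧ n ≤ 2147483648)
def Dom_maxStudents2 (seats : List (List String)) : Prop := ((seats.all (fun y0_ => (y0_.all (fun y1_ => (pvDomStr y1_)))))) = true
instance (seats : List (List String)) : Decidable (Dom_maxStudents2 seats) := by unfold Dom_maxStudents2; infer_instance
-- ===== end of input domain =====

-- B replaces A's full (2^n)×(2^n) per-row mask scan by a DP keyed only on the
-- reachable no-adjacent-bit masks: the valid masks (with popcounts) are generated
-- once Fibonacci-style and each row keeps a dict of reachable states, so the inner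
-- loop runs over the previous row's dict items instead of all 2^n masks (faster,
-- measured).

-- ===== PORT A =====
-- countBits: Python's Kernighan loop 'while n: res += 1; n &= n - 1'.
-- (A only applies it to the nonnegative loop indices j, so it is ported on Nat.)
def cbA (n : Nat) : Int :=
  if h : n = 0 then 0 else 1 + cbA (n &&& (n - 1))
decreasing_by
  exact Nat.lt_of_le_of_lt (Nat.and_le_right) (by omega)

-- All mask values in A are nonnegative Python ints, ported on Nat.
def maxStudents2 (seats : List (List String)) : Int :=
  let n := seats.headI.length
  let rows : List Nat := seats.map (fun r =>
    (r.take n).foldl (fun cur s => (cur <<< 1) ||| (if s = "." then 1 else 0)) 0)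
  let N := 2 ^ n
  let dp0 : List Int := (List.replicate N (-1 : Int)).set 0 0
  let final := rows.foldl (fun prev row =>
    (List.range N).map (fun j =>
      if j &&& row = j ∧ j &&& (j >>> 1) = 0 then
        (List.range N).foldl (fun acc k =>
          if j &&& (k >>> 1) = 0 ∧ (j >>> 1) &&& k = 0 ∧ prev.getD k (-1) ≠ -1 then
            max acc (prev.getD k (-1) + cbA j)
          else acc) (-1)
      else (-1 : Int))) dp0
  match PySem.List.max? final (fun x => x) with
  | some v => v
  | none => 0   -- unreachable: final has length 2^n ≥ 1

-- ===== PORT B =====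
-- validPairs w = Source B's Fibonacci-style build of all width-w bitmasks with no two
-- adjacent set bits, paired with their popcounts (structural recursion of the loop).
def validPairs : Nat → List (Nat × Int)
  | 0 => [(0, 0)]
  | 1 => [(0, 0), (1, 1)]
  | (i + 2) => validPairs (i + 1) ++ (validPairs i).map (fun mc => (mc.1 ||| (1 <<< (i + 1)), mc.2 + 1))

def maxStudents2_alt (seats : List (List String)) : Int :=
  let n := seats.headI.length
  let valid := validPairs n
  let last := seats.foldl (fun prev r =>
    let allowed : Nat := (r.take n).foldl (fun cur s => (cur <<< 1) ||| (if s = "." then 1 else 0)) 0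
    valid.foldl (fun cur mc =>
      if mc.1 &&& allowed = mc.1 then
        let best : Int :=
          match PySem.List.max? ((prev.items.filter (fun kv =>
              mc.1 &&& (kv.1 >>> 1) = 0 ∧ (mc.1 >>> 1) &&& kv.1 = 0)).map Prod.snd) (fun x => x) with
          | some v => v
          | none => -1   -- the 'default=-1' of Source B's max
        cur.insert mc.1 (best + mc.2)
      else cur) PySem.Dict.empty) (PySem.Dict.ofList [(0, 0)] : PySem.Dict Nat Int)
  match PySem.List.max? last.values (fun x => x) with
  | some v => v
  | none => 0   -- unreachable: mask 0 is always a key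

-- ===== PRECONDITION & SPEC =====
-- Pre_ excludes exactly the inputs on which the Python A raises an IndexError:
-- the empty list (seats[0]) and inputs where some row is shorter than the first
-- row (seats[i][j] is read for every j < len(seats[0])).
def Pre_maxStudents2 (seats : List (List String)) : Prop :=
  seats ≠ [] ∧ ∀ r ∈ seats, seats.headI.length ≤ r.length
instance (seats : List (List String)) : Decidable (Pre_maxStudents2 seats) := by
  unfold Pre_maxStudents2; infer_instance

def pvWitness_maxStudents2 : List (List String) := [[".", "#"], [".", "."]]

def Spec_maxStudents2 (seats : List (List String)) (out : Int) : Prop := out = maxStudents2_alt seats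
instance (seats : List (List String)) (out : Int) : Decidable (Spec_maxStudents2 seats out) := by unfold Spec_maxStudents2; infer_instance

-- ===== CLAIM (what is proved, stated in full; the proofs are below) =====
def Claim_equal_maxStudents2 : Prop := ∀ (seats : List (List String)), Dom_maxStudents2 seats → Pre_maxStudents2 seats → Spec_maxStudents2 seats (maxStudents2 seats)

-- ===== LEMMAS AND PROOFS =====

theorem myL1 (t m : Nat) (h : m < 2^t) : 2^t ||| m = 2^t + m := by
  apply Nat.eq_of_testBit_eq
  intro i
  rw [Nat.testBit_lor, Nat.testBit_eq_decide_div_mod_eq, Nat.testBit_eq_decide_div_mod_eq,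
      Nat.testBit_eq_decide_div_mod_eq]
  have hpos : 0 < 2^i := Nat.two_pow_pos i
  rcases Nat.lt_trichotomy i t with hi | hi | hi
  · have hd : (2:Nat)^t = 2^(t-i) * 2^i := by rw [← pow_add]; congr 1; omega
    have h1 : (2^t + m) / 2^i = m / 2^i + 2^(t-i) := by
      rw [hd, Nat.add_comm, Nat.add_mul_div_right _ _ hpos]
    have he : (2:Nat)^(t-i) = 2 * 2^(t-i-1) := by rw [← pow_succ']; congr 1; omega
    have h2 : (2:Nat)^t / 2^i = 2^(t-i) := by rw [hd, Nat.mul_div_cancel _ hpos]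
    rw [h1, h2]
    rcases Nat.mod_two_eq_zero_or_one (m / 2^i) with h3 | h3
    · simp [Nat.add_mul_mod_self_left, he]
    · simp [Nat.add_mul_mod_self_left, he]
  · subst hi
    have h1 : (2^i + m) / 2^i = 1 := by
      rw [Nat.add_comm, Nat.add_div_right _ hpos, Nat.div_eq_of_lt h]
    have h2 : (2:Nat)^i / 2^i = 1 := Nat.div_self hpos
    have h3 : m / 2^i = 0 := Nat.div_eq_of_lt h
    rw [h1, h2, h3]
    simp
  · have hit : (2:Nat)^(t+1) ≤ 2^i := Nat.pow_le_pow_right (by norm_num) hi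
    have hit2 : (2:Nat)^(t+1) = 2^t + 2^t := by ring
    have h1 : (2^t + m) / 2^i = 0 := Nat.div_eq_of_lt (by omega)
    have h2 : (2:Nat)^t / 2^i = 0 := Nat.div_eq_of_lt (by omega)
    have h3 : m / 2^i = 0 := Nat.div_eq_of_lt (by omega)
    rw [h1, h2, h3]
    simp

theorem myL2 (z x y : Nat) : (z ||| x) &&& (z ||| y) = z ||| (x &&& y) := by
  apply Nat.eq_of_testBit_eq
  intro i
  simp only [Nat.testBit_land, Nat.testBit_lor]
  cases z.testBit i <;> simp

theorem myLtOfTestBit (i m : Nat) (h : m < 2^(i+1)) (hb : m.testBit i = false) : m < 2^i := by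
  rw [Nat.testBit_eq_decide_div_mod_eq] at hb
  simp at hb
  have hpos : 0 < 2^i := Nat.two_pow_pos i
  have h2 : m / 2^i < 2 := by
    rw [Nat.div_lt_iff_lt_mul hpos]
    have : (2:Nat)^(i+1) = 2^i * 2 := by ring
    omega
  have := Nat.div_add_mod m (2^i)
  have hm : m % 2^i < 2^i := Nat.mod_lt _ hpos
  interval_cases h3 : m / 2^i <;> omega

theorem myTestBitFalse (i m : Nat) (h : m < 2^i) : m.testBit i = false :=
  Nat.testBit_lt_two_pow h

theorem myLandZeroIff (a b : Nat) : a &&& b = 0 ↔ ∀ i, ¬(a.testBit i = true ∧ b.testBit i = true) := by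
  constructor
  · intro h i ⟨h1, h2⟩
    have : (a &&& b).testBit i = false := by rw [h]; exact Nat.zero_testBit i
    rw [Nat.testBit_land, h1, h2] at this
    simp at this
  · intro h
    apply Nat.eq_of_testBit_eq
    intro i
    rw [Nat.zero_testBit, Nat.testBit_land]
    have := h i
    cases ha : a.testBit i <;> cases hb : b.testBit i <;> simp_all

theorem myB1 (i m : Nat) (h : m < 2^(i+1)) :
    ((2^(i+1) + m) &&& ((2^(i+1) + m) >>> 1) = 0) ↔ (m < 2^i ∧ m &&& (m >>> 1) = 0) := by
  rw [← myL1 _ _ h]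
  rw [myLandZeroIff, myLandZeroIff]
  have hsb : ∀ b, ((2^(i+1) ||| m) >>> 1).testBit b = true ↔ (b = i ∨ m.testBit (b+1) = true) := by
    intro b
    rw [Nat.testBit_shiftRight, Nat.testBit_lor, Nat.testBit_two_pow]
    constructor
    · intro hh
      rcases Bool.or_eq_true_iff.mp hh with hh | hh
      · left; have := of_decide_eq_true hh; omega
      · right; rwa [Nat.add_comm 1 b] at hh
    · intro hh
      rcases hh with hh | hh
      · apply Bool.or_eq_true_iff.mpr; left; subst hh; simp [Nat.add_comm]
      · apply Bool.or_eq_true_iff.mpr; right; rwa [Nat.add_comm 1 b]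
  have htb : ∀ b, (2^(i+1) ||| m).testBit b = true ↔ (b = i + 1 ∨ m.testBit b = true) := by
    intro b
    rw [Nat.testBit_lor, Nat.testBit_two_pow]
    constructor
    · intro hh
      rcases Bool.or_eq_true_iff.mp hh with hh | hh
      · left; have := of_decide_eq_true hh; omega
      · right; exact hh
    · intro hh
      rcases hh with hh | hh
      · apply Bool.or_eq_true_iff.mpr; left; subst hh; simp
      · apply Bool.or_eq_true_iff.mpr; right; exact hh
  constructor
  · intro hall
    have hmi : m.testBit i = false := by
      by_contra hc
      have hc' : m.testBit i = true := by simpa using hc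
      exact hall i ⟨(htb i).mpr (Or.inr hc'), (hsb i).mpr (Or.inl rfl)⟩
    have hlt : m < 2^i := myLtOfTestBit i m h hmi
    refine ⟨hlt, ?_⟩
    intro b ⟨c1, c2⟩
    rw [Nat.testBit_shiftRight, Nat.add_comm 1 b] at c2
    exact hall b ⟨(htb b).mpr (Or.inr c1), (hsb b).mpr (Or.inr c2)⟩
  · rintro ⟨hlt, hadj⟩ b ⟨c1, c2⟩
    rcases (htb b).mp c1 with hb | hb
    · subst hb
      rcases (hsb (i+1)).mp c2 with hb2 | hb2
      · omega
      · have : m.testBit (i+2) = false := myTestBitFalse _ _ (lt_of_lt_of_le hlt (Nat.pow_le_pow_right (by norm_num) (by omega)))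
        rw [this] at hb2; cases hb2
    · rcases (hsb b).mp c2 with hb2 | hb2
      · subst hb2
        have : m.testBit b = false := myTestBitFalse _ _ hlt
        rw [this] at hb; cases hb
      · exact hadj b ⟨hb, by rw [Nat.testBit_shiftRight, Nat.add_comm 1 b]; exact hb2⟩


theorem myKern (t m : Nat) (h0 : 0 < m) (h : m < 2^t) :
    (2^t + m) &&& (2^t + m - 1) = 2^t + (m &&& (m - 1)) := by
  have e1 : 2^t + m - 1 = 2^t + (m - 1) := by omega
  have e2 : 2^t + (m-1) = 2^t ||| (m-1) := (myL1 t (m-1) (by omega)).symm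
  have e3 : 2^t + m = 2^t ||| m := (myL1 t m h).symm
  have e4 : m &&& (m-1) < 2^t := Nat.lt_of_le_of_lt (Nat.and_le_right) (by omega)
  rw [e1, e2, e3, myL2, myL1 t _ e4]

theorem cbA_nonneg (n : Nat) : 0 ≤ cbA n := by
  induction n using Nat.strong_induction_on with
  | _ n ih =>
    rw [cbA]
    split
    · exact le_refl 0
    · rename_i h
      have := ih (n &&& (n-1)) (Nat.lt_of_le_of_lt (Nat.and_le_right) (by omega))
      omega

theorem cbA_zero : cbA 0 = 0 := by rw [cbA]; simp

theorem cbA_two_pow (t : Nat) : cbA (2^t) = 1 := by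
  have hne : (2:Nat)^t ≠ 0 := by have := Nat.two_pow_pos t; omega
  rw [cbA, dif_neg hne]
  have hz : 2^t &&& (2^t - 1) = 0 := by
    rw [myLandZeroIff]
    intro i ⟨c1, c2⟩
    rw [Nat.testBit_two_pow] at c1
    have : i = t := by have := of_decide_eq_true c1; omega
    subst this
    rw [myTestBitFalse i _ (by have := Nat.two_pow_pos i; omega)] at c2
    cases c2
  rw [hz, cbA_zero]
  ring

theorem cbA_pow_add (t : Nat) : ∀ m, m < 2^t → cbA (2^t + m) = cbA m + 1 := by
  intro m
  induction m using Nat.strong_induction_on with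
  | _ m ih =>
    intro hm
    by_cases h0 : m = 0
    · subst h0
      show cbA (2^t + 0) = cbA 0 + 1
      rw [Nat.add_zero, cbA_zero, cbA_two_pow]
      ring
    · have hpos : 0 < m := Nat.pos_of_ne_zero h0
      have hne : 2^t + m ≠ 0 := by have := Nat.two_pow_pos t; omega
      rw [cbA]
      rw [dif_neg hne]
      rw [myKern t m hpos hm]
      have hlt : m &&& (m-1) < m := Nat.lt_of_le_of_lt (Nat.and_le_right) (by omega)
      rw [ih _ hlt (lt_trans hlt hm)]
      conv_rhs => rw [cbA, dif_neg h0]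
      ring


theorem VP1 : ∀ w, (validPairs w).map Prod.fst
    = (List.range (2^w)).filter (fun m => decide (m &&& (m >>> 1) = 0)) := by
  intro w
  induction w using validPairs.induct with
  | case1 => decide
  | case2 => decide
  | case3 i ih1 ih2 =>
    rw [validPairs]
    rw [List.map_append, List.map_map]
    have hsplit : (2:Nat)^(i+2) = 2^(i+1) + 2^(i+1) := by ring
    rw [hsplit, List.range_add, List.filter_append, ← ih1]
    congr 1
    rw [List.filter_map]
    have hc1 : ∀ m ∈ List.range (2^(i+1)),
        ((fun m => decide (m &&& (m >>> 1) = 0)) ∘ (fun x => 2^(i+1) + x)) m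
          = decide (m < 2^i ∧ m &&& (m >>> 1) = 0) := by
      intro m hm
      rw [List.mem_range] at hm
      simp only [Function.comp_apply]
      exact decide_eq_decide.mpr (myB1 i m hm)
    rw [List.filter_congr hc1]
    have hsplit2 : (2:Nat)^(i+1) = 2^i + 2^i := by ring
    rw [hsplit2, List.range_add, List.filter_append]
    have hc2 : ∀ m ∈ List.range (2^i),
        (fun m => decide (m < 2^i ∧ m &&& (m >>> 1) = 0)) m
          = (fun m => decide (m &&& (m >>> 1) = 0)) m := by
      intro m hm
      rw [List.mem_range] at hm
      simp [hm]
    rw [List.filter_congr hc2, ← ih2]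
    have hnil : ((List.range (2^i)).map (fun x => 2^i + x)).filter
        (fun m => decide (m < 2^i ∧ m &&& (m >>> 1) = 0)) = [] := by
      apply List.filter_eq_nil_iff.mpr
      intro a ha
      rw [List.mem_map] at ha
      obtain ⟨x, _, rfl⟩ := ha
      simp
    rw [hnil, List.append_nil, List.map_map]
    apply List.map_congr_left
    intro mc hmc
    have hx : mc.1 ∈ (validPairs i).map Prod.fst := List.mem_map_of_mem hmc
    rw [ih2] at hx
    have hxr : mc.1 < 2^i := List.mem_range.mp (List.mem_of_mem_filter hx)
    show mc.1 ||| (1 <<< (i+1)) = 2^i + 2^i + mc.1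
    have hss : (2:Nat)^i + 2^i = 2^(i+1) := by ring
    rw [Nat.one_shiftLeft, Nat.lor_comm, hss]
    exact myL1 (i+1) mc.1 (lt_of_lt_of_le hxr (Nat.pow_le_pow_right (by norm_num) (by omega)))

theorem VPlt (w : Nat) (mc : Nat × Int) (h : mc ∈ validPairs w) : mc.1 < 2^w := by
  have hx : mc.1 ∈ (validPairs w).map Prod.fst := List.mem_map_of_mem h
  rw [VP1] at hx
  exact List.mem_range.mp (List.mem_of_mem_filter hx)

theorem VPadj (w : Nat) (mc : Nat × Int) (h : mc ∈ validPairs w) : mc.1 &&& (mc.1 >>> 1) = 0 := by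
  have hx : mc.1 ∈ (validPairs w).map Prod.fst := List.mem_map_of_mem h
  rw [VP1] at hx
  exact of_decide_eq_true ((List.mem_filter.mp hx).2)

theorem VP2 : ∀ w, ∀ mc ∈ validPairs w, mc.2 = cbA mc.1 := by
  intro w
  induction w using validPairs.induct with
  | case1 =>
    intro mc hmc
    simp [validPairs] at hmc
    subst hmc
    rw [cbA_zero]
  | case2 =>
    intro mc hmc
    simp only [validPairs, List.mem_cons, List.not_mem_nil, or_false] at hmc
    rcases hmc with hmc | hmc <;> subst hmc
    · rw [cbA_zero]
    · show (1:Int) = cbA 1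
      rw [cbA]
      norm_num
      rw [cbA_zero]
  | case3 i ih1 ih2 =>
    intro mc hmc
    rw [validPairs] at hmc
    rcases List.mem_append.mp hmc with hmc | hmc
    · exact ih1 mc hmc
    · rw [List.mem_map] at hmc
      obtain ⟨xc, hxc, rfl⟩ := hmc
      have hlt : xc.1 < 2^i := VPlt i xc hxc
      show xc.2 + 1 = cbA (xc.1 ||| (1 <<< (i+1)))
      rw [Nat.one_shiftLeft, Nat.lor_comm,
          myL1 (i+1) xc.1 (lt_of_lt_of_le hlt (Nat.pow_le_pow_right (by norm_num) (by omega))),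
          cbA_pow_add (i+1) xc.1 (lt_of_lt_of_le hlt (Nat.pow_le_pow_right (by norm_num) (by omega))),
          ih2 xc hxc]
      push_cast
      ring

def stepF (N : Nat) (f : Nat → Int) (row : Nat) (j : Nat) : Int :=
  if j &&& row = j ∧ j &&& (j >>> 1) = 0 then
    (List.range N).foldl (fun acc k =>
      if j &&& (k >>> 1) = 0 ∧ (j >>> 1) &&& k = 0 ∧ f k ≠ -1 then max acc (f k + cbA j) else acc) (-1)
  else -1

def bestOf (prev : PySem.Dict Nat Int) (j : Nat) : Int :=
  match PySem.List.max? ((prev.items.filter (fun kv =>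
      j &&& (kv.1 >>> 1) = 0 ∧ (j >>> 1) &&& kv.1 = 0)).map Prod.snd) (fun x => x) with
  | some v => v
  | none => -1

theorem foldl_max_if_init_le (l : List Nat) (c : Nat → Prop) [DecidablePred c]
    (g : Nat → Int) (init : Int) :
    init ≤ l.foldl (fun a k => if c k then max a (g k) else a) init := by
  induction l generalizing init with
  | nil => exact le_refl _
  | cons x t ih =>
    simp only [List.foldl_cons]
    refine le_trans ?_ (ih _)
    split
    · exact le_max_left _ _
    · exact le_refl _

theorem foldl_max_if_mem_le (l : List Nat) (c : Nat → Prop) [DecidablePred c]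
    (g : Nat → Int) (init : Int) (k0 : Nat) (hk : k0 ∈ l) (hc : c k0) :
    g k0 ≤ l.foldl (fun a k => if c k then max a (g k) else a) init := by
  induction l generalizing init with
  | nil => cases hk
  | cons x t ih =>
    simp only [List.foldl_cons]
    by_cases hmem : k0 ∈ t
    · exact ih _ hmem
    · have : k0 = x := by
        rcases List.mem_cons.mp hk with h | h
        · exact h
        · exact absurd h hmem
      subst this
      rw [if_pos hc]
      exact le_trans (le_max_right _ _) (foldl_max_if_init_le t c g _)

theorem foldl_if3_split (l : List Nat) (q1 q2 p : Nat → Prop)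
    [DecidablePred q1] [DecidablePred q2] [DecidablePred p] (g : Nat → Int) (init : Int) :
    l.foldl (fun a k => if q1 k ∧ q2 k ∧ p k then max a (g k) else a) init
      = ((l.filter (fun k => decide (p k))).filter
          (fun k => decide (q1 k ∧ q2 k))).foldl (fun a k => max a (g k)) init := by
  induction l generalizing init with
  | nil => rfl
  | cons x t ih =>
    simp only [List.foldl_cons, List.filter_cons]
    by_cases hp : p x
    · by_cases hq1 : q1 x
      · by_cases hq2 : q2 x
        · rw [if_pos ⟨hq1, hq2, hp⟩]
          simp [hp, hq1, hq2, ih]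
        · rw [if_neg (by tauto)]
          simp [hp, hq1, hq2, ih]
      · rw [if_neg (by tauto)]
        simp [hp, hq1, ih]
    · rw [if_neg (by tauto)]
      simp [hp, ih]

theorem foldl_max_add (t : List Nat) (f : Nat → Int) (C x : Int) :
    t.foldl (fun a k => max a (f k + C)) (x + C) = (t.foldl (fun a k => max a (f k)) x) + C := by
  induction t generalizing x with
  | nil => rfl
  | cons y s ih =>
    simp only [List.foldl_cons]
    rw [show max (x + C) (f y + C) = max x (f y) + C from (Int.max_add_right x (f y) C), ih]

theorem dictfold_if_filter (l : List (Nat × Int)) (P : Nat × Int → Prop) [DecidablePred P]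
    (F : PySem.Dict Nat Int → Nat × Int → PySem.Dict Nat Int) (d : PySem.Dict Nat Int) :
    l.foldl (fun cur mc => if P mc then F cur mc else cur) d
      = (l.filter (fun mc => decide (P mc))).foldl F d := by
  induction l generalizing d with
  | nil => rfl
  | cons x t ih =>
    simp only [List.foldl_cons, List.filter_cons]
    by_cases hx : P x <;> simp [hx, ih]

theorem stepF_invalid (N : Nat) (f : Nat → Int) (row j : Nat)
    (h : ¬(j &&& row = j ∧ j &&& (j >>> 1) = 0)) : stepF N f row j = -1 := by
  rw [stepF, if_neg h]

theorem stepF_valid_ge (n : Nat) (f : Nat → Int) (row j : Nat)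
    (h0 : (0:Int) ≤ f 0) (hj1 : j &&& row = j) (hj2 : j &&& (j >>> 1) = 0) :
    f 0 + cbA j ≤ stepF (2^n) f row j := by
  rw [stepF, if_pos ⟨hj1, hj2⟩]
  apply foldl_max_if_mem_le (List.range (2^n))
    (fun k => j &&& (k >>> 1) = 0 ∧ (j >>> 1) &&& k = 0 ∧ f k ≠ -1)
    (fun k => f k + cbA j) (-1) 0
  · exact List.mem_range.mpr (Nat.two_pow_pos n)
  · refine ⟨by simp, by simp, by omega⟩

theorem stepF_valid_nonneg (n : Nat) (f : Nat → Int) (row j : Nat)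
    (h0 : (0:Int) ≤ f 0) (hj1 : j &&& row = j) (hj2 : j &&& (j >>> 1) = 0) :
    0 ≤ stepF (2^n) f row j := by
  have := stepF_valid_ge n f row j h0 hj1 hj2
  have := cbA_nonneg j
  omega

theorem step_val (n : Nat) (f : Nat → Int) (prev : PySem.Dict Nat Int)
    (hprev : prev.items
      = ((List.range (2^n)).filter (fun k => decide (f k ≠ -1))).map (fun k => (k, f k)))
    (h0 : (0:Int) ≤ f 0) (hpos : ∀ k, f k ≠ -1 → 0 ≤ f k)
    (row j : Nat) (hj1 : j &&& row = j) (hj2 : j &&& (j >>> 1) = 0) :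
    stepF (2^n) f row j = bestOf prev j + cbA j := by
  rw [stepF, if_pos ⟨hj1, hj2⟩]
  rw [foldl_if3_split (List.range (2^n)) (fun k => j &&& (k >>> 1) = 0)
      (fun k => (j >>> 1) &&& k = 0) (fun k => f k ≠ -1) (fun k => f k + cbA j) (-1)]
  set K := ((List.range (2^n)).filter (fun k => decide (f k ≠ -1))).filter
      (fun k => decide (j &&& (k >>> 1) = 0 ∧ (j >>> 1) &&& k = 0)) with hK
  have h0mem : 0 ∈ K := by
    rw [hK]
    apply List.mem_filter.mpr
    refine ⟨List.mem_filter.mpr ⟨List.mem_range.mpr (Nat.two_pow_pos n), by simp; omega⟩, by simp⟩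
  obtain ⟨c, t, hct⟩ := List.exists_cons_of_ne_nil (List.ne_nil_of_mem h0mem)
  have hcK : c ∈ K := by rw [hct]; exact List.mem_cons_self
  have hcf : f c ≠ -1 := by
    have h1 := (List.mem_filter.mp hcK).1
    have h2 := (List.mem_filter.mp h1).2
    exact of_decide_eq_true h2
  have hcge : (0:Int) ≤ f c := hpos c hcf
  -- LHS fold
  rw [hct]
  simp only [List.foldl_cons]
  have hmax1 : max (-1) (f c + cbA j) = f c + cbA j := by
    have := cbA_nonneg j; omega
  rw [hmax1, foldl_max_add t f (cbA j) (f c)]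
  -- RHS bestOf
  have hitems : (prev.items.filter (fun kv =>
      j &&& (kv.1 >>> 1) = 0 ∧ (j >>> 1) &&& kv.1 = 0)).map Prod.snd = K.map f := by
    rw [hprev]
    rw [List.filter_map]
    rw [List.map_map]
    simp only [Function.comp_def]
    rw [hK]
  rw [bestOf, hitems, hct]
  simp only [List.map_cons]
  rw [PySem.List.max?_id_cons]
  rw [List.foldl_map]

def Bstep (n : Nat) (prev : PySem.Dict Nat Int) (row : Nat) : PySem.Dict Nat Int :=
  (validPairs n).foldl (fun cur mc =>
    if mc.1 &&& row = mc.1 then cur.insert mc.1 (bestOf prev mc.1 + mc.2) else cur)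
    PySem.Dict.empty

theorem stepF_zero_nonneg (n : Nat) (f : Nat → Int) (row : Nat) (h0 : (0:Int) ≤ f 0) :
    0 ≤ stepF (2^n) f row 0 :=
  stepF_valid_nonneg n f row 0 h0 (Nat.zero_and row) (by simp)

theorem stepF_pos (n : Nat) (f : Nat → Int) (row : Nat) (h0 : (0:Int) ≤ f 0) :
    ∀ k, stepF (2^n) f row k ≠ -1 → 0 ≤ stepF (2^n) f row k := by
  intro k hk
  by_cases hg : k &&& row = k ∧ k &&& (k >>> 1) = 0
  · exact stepF_valid_nonneg n f row k h0 hg.1 hg.2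
  · exact absurd (stepF_invalid _ f row k hg) hk

theorem step_items (n : Nat) (f : Nat → Int) (prev : PySem.Dict Nat Int) (row : Nat)
    (hprev : prev.items
      = ((List.range (2^n)).filter (fun k => decide (f k ≠ -1))).map (fun k => (k, f k)))
    (h0 : (0:Int) ≤ f 0) (hpos : ∀ k, f k ≠ -1 → 0 ≤ f k) :
    (Bstep n prev row).items
      = ((List.range (2^n)).filter (fun j => decide (stepF (2^n) f row j ≠ -1))).map
          (fun j => (j, stepF (2^n) f row j)) := by
  rw [Bstep]
  rw [dictfold_if_filter (validPairs n) (fun mc => mc.1 &&& row = mc.1)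
      (fun cur mc => cur.insert mc.1 (bestOf prev mc.1 + mc.2)) PySem.Dict.empty]
  set L := (validPairs n).filter (fun mc => decide (mc.1 &&& row = mc.1)) with hL
  have hsubl : List.Sublist L (validPairs n) := List.filter_sublist
  have hnodupV : ((validPairs n).map Prod.fst).Nodup := by
    rw [VP1]; exact (List.nodup_range).filter _
  have hnodup : (L.map (fun mc => mc.1)).Nodup := (hsubl.map Prod.fst).nodup hnodupV
  rw [PySem.Dict.items_foldl_insert_fresh L (fun mc => mc.1)
      (fun mc => bestOf prev mc.1 + mc.2) PySem.Dict.empty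
      (by intro a _; simp [PySem.Dict.contains_empty]) hnodup]
  have hmap : L.map (fun mc => (mc.1, bestOf prev mc.1 + mc.2))
      = L.map (fun mc => (mc.1, stepF (2^n) f row mc.1)) := by
    apply List.map_congr_left
    intro mc hmc
    have hmcV : mc ∈ validPairs n := hsubl.mem hmc
    have hj1 : mc.1 &&& row = mc.1 := of_decide_eq_true ((List.mem_filter.mp hmc).2)
    have hj2 : mc.1 &&& (mc.1 >>> 1) = 0 := VPadj n mc hmcV
    rw [VP2 n mc hmcV, ← step_val n f prev hprev h0 hpos row mc.1 hj1 hj2]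
  rw [hmap]
  have hmm : L.map (fun mc => (mc.1, stepF (2^n) f row mc.1))
      = (L.map Prod.fst).map (fun j => (j, stepF (2^n) f row j)) := by
    rw [List.map_map]
    rfl
  rw [hmm]
  have hLfst : L.map Prod.fst
      = ((validPairs n).map Prod.fst).filter (fun j => decide (j &&& row = j)) := by
    rw [hL, List.filter_map]
    rfl
  rw [hLfst, VP1, List.filter_filter]
  have hcong : ∀ j ∈ List.range (2^n),
      (fun j => decide (stepF (2^n) f row j ≠ -1)) j
        = (fun a => decide (a &&& row = a) && decide (a &&& (a >>> 1) = 0)) j := by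
    intro j _
    by_cases hg : j &&& row = j ∧ j &&& (j >>> 1) = 0
    · have := stepF_valid_nonneg n f row j h0 hg.1 hg.2
      simp [hg.1, hg.2]
      omega
    · have := stepF_invalid (2^n) f row j hg
      simp [this]
      tauto
  rw [← List.filter_congr hcong]
  have : PySem.Dict.empty.items = ([] : List (Nat × Int)) := rfl
  rw [this, List.nil_append]

theorem main_fold (n : Nat) (rs : List Nat) : ∀ (f : Nat → Int) (prev : PySem.Dict Nat Int),
    (0:Int) ≤ f 0 → (∀ k, f k ≠ -1 → 0 ≤ f k) →
    prev.items = ((List.range (2^n)).filter (fun k => decide (f k ≠ -1))).map (fun k => (k, f k)) →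
    (rs.foldl (Bstep n) prev).items
      = ((List.range (2^n)).filter (fun k => decide ((rs.foldl (stepF (2^n)) f) k ≠ -1))).map
          (fun k => (k, (rs.foldl (stepF (2^n)) f) k))
    ∧ (0:Int) ≤ (rs.foldl (stepF (2^n)) f) 0 := by
  induction rs with
  | nil =>
    intro f prev h0 _ hprev
    exact ⟨hprev, h0⟩
  | cons r rest ih =>
    intro f prev h0 hpos hprev
    simp only [List.foldl_cons]
    exact ih (stepF (2^n) f r) (Bstep n prev r)
      (stepF_zero_nonneg n f r h0)
      (stepF_pos n f r h0)
      (step_items n f prev r hprev h0 hpos)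

def rowOf (n : Nat) (r : List String) : Nat :=
  (r.take n).foldl (fun cur s => (cur <<< 1) ||| (if s = "." then 1 else 0)) 0

theorem foldl_congr_mem' {α β : Type} (l : List α) (f g : β → α → β) (i : β)
    (h : ∀ b, ∀ a ∈ l, f b a = g b a) : l.foldl f i = l.foldl g i := by
  induction l generalizing i with
  | nil => rfl
  | cons x t ih =>
    simp only [List.foldl_cons]
    rw [h i x List.mem_cons_self]
    exact ih _ (fun b a ha => h b a (List.mem_cons_of_mem x ha))

theorem getD_map_range (N k : Nat) (f : Nat → Int) (hk : k < N) :
    ((List.range N).map f).getD k (-1) = f k := by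
  rw [List.getD_eq_getElem?_getD]
  simp [hk]

def AstepL (N : Nat) (prev : List Int) (row : Nat) : List Int :=
  (List.range N).map (fun j =>
    if j &&& row = j ∧ j &&& (j >>> 1) = 0 then
      (List.range N).foldl (fun acc k =>
        if j &&& (k >>> 1) = 0 ∧ (j >>> 1) &&& k = 0 ∧ prev.getD k (-1) ≠ -1 then
          max acc (prev.getD k (-1) + cbA j)
        else acc) (-1)
    else (-1 : Int))

theorem Astep_map (N : Nat) (f : Nat → Int) (row : Nat) :
    AstepL N ((List.range N).map f) row = (List.range N).map (stepF N f row) := by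
  apply List.map_congr_left
  intro j _
  rw [stepF]
  by_cases hg : j &&& row = j ∧ j &&& (j >>> 1) = 0
  · rw [if_pos hg, if_pos hg]
    apply foldl_congr_mem'
    intro b k hk
    have hkN : k < N := List.mem_range.mp hk
    rw [getD_map_range N k f hkN]
  · rw [if_neg hg, if_neg hg]

theorem Afold_map (N : Nat) (rows : List Nat) : ∀ (f : Nat → Int),
    rows.foldl (AstepL N) ((List.range N).map f)
      = (List.range N).map (rows.foldl (stepF N) f) := by
  induction rows with
  | nil => intro f; rfl
  | cons r rest ih =>
    intro f
    simp only [List.foldl_cons]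
    rw [Astep_map, ih]

theorem dp0_eq (N : Nat) (_hN : 0 < N) :
    (List.replicate N (-1 : Int)).set 0 0
      = (List.range N).map (fun j => if j = 0 then (0:Int) else -1) := by
  apply List.ext_getElem
  · simp
  · intro i h1 h2
    simp only [List.getElem_set, List.getElem_replicate, List.getElem_map, List.getElem_range]
    rcases Nat.eq_zero_or_pos i with rfl | hi
    · simp
    · rw [if_neg (by omega), if_neg (by omega)]

theorem base_items (N : Nat) (hN : 0 < N) :
    ((List.range N).filter (fun k => decide ((if k = 0 then (0:Int) else -1) ≠ -1))).map
        (fun k => (k, if k = 0 then (0:Int) else -1)) = [(0, (0:Int))] := by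
  have hc : ∀ k ∈ List.range N,
      (fun k => decide ((if k = 0 then (0:Int) else -1) ≠ -1)) k = (fun k => decide (k = 0)) k := by
    intro k _
    by_cases hk : k = 0 <;> simp [hk]
  rw [List.filter_congr hc]
  obtain ⟨M, rfl⟩ : ∃ M, N = M + 1 := ⟨N - 1, by omega⟩
  rw [List.range_succ_eq_map]
  rw [List.filter_cons]
  simp only [decide_eq_true_eq]
  rw [List.filter_map]
  have : (List.range M).filter ((fun k => decide (k = 0)) ∘ Nat.succ) = [] := by
    apply List.filter_eq_nil_iff.mpr
    intro a _
    simp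
  rw [this]
  simp

theorem final_max (N : Nat) (hN : 0 < N) (F : Nat → Int) (h0 : (0:Int) ≤ F 0) :
    (match PySem.List.max? ((List.range N).map F) (fun x => x) with
     | some v => v | none => (0:Int))
    = (match PySem.List.max? (((List.range N).filter (fun k => decide (F k ≠ -1))).map F)
          (fun x => x) with
       | some v => v | none => (0:Int)) := by
  have h0r : 0 ∈ List.range N := List.mem_range.mpr hN
  have h0f : 0 ∈ (List.range N).filter (fun k => decide (F k ≠ -1)) :=
    List.mem_filter.mpr ⟨h0r, by simp; omega⟩
  have h1ne : (List.range N).map F ≠ [] := by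
    simp [List.map_eq_nil_iff]
    omega
  have h2ne : (((List.range N).filter (fun k => decide (F k ≠ -1))).map F) ≠ [] := by
    simp only [ne_eq, List.map_eq_nil_iff]
    exact List.ne_nil_of_mem h0f
  rcases hm1 : PySem.List.max? ((List.range N).map F) (fun x => x) with _ | v1
  · exact absurd ((PySem.List.max?_eq_none_iff _ _).mp hm1) h1ne
  rcases hm2 : PySem.List.max? (((List.range N).filter (fun k => decide (F k ≠ -1))).map F)
      (fun x => x) with _ | v2
  · exact absurd ((PySem.List.max?_eq_none_iff _ _).mp hm2) h2ne
  simp only []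
  have hsub : ∀ y, y ∈ (((List.range N).filter (fun k => decide (F k ≠ -1))).map F) →
      y ∈ (List.range N).map F := by
    intro y hy
    rw [List.mem_map] at hy ⊢
    obtain ⟨k, hk, rfl⟩ := hy
    exact ⟨k, List.mem_of_mem_filter hk, rfl⟩
  have hv2mem := PySem.List.max?_mem hm2
  have hle1 : v2 ≤ v1 := PySem.List.max?_isMax hm1 v2 (hsub v2 hv2mem)
  have hF0le : F 0 ≤ v2 := PySem.List.max?_isMax hm2 (F 0) (List.mem_map_of_mem h0f)
  have hv1mem := PySem.List.max?_mem hm1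
  rw [List.mem_map] at hv1mem
  obtain ⟨x, hx, rfl⟩ := hv1mem
  by_cases hxne : F x = -1
  · omega
  · have : F x ∈ (((List.range N).filter (fun k => decide (F k ≠ -1))).map F) :=
      List.mem_map_of_mem (List.mem_filter.mpr ⟨hx, by simpa using hxne⟩)
    have := PySem.List.max?_isMax hm2 (F x) this
    omega


theorem ports_eq (seats : List (List String)) : maxStudents2 seats = maxStudents2_alt seats := by
  have hNpos : 0 < 2^seats.headI.length := Nat.two_pow_pos _
  have hA : maxStudents2 seats
      = (match PySem.List.max? (((seats.map (rowOf seats.headI.length)).foldl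
            (AstepL (2^seats.headI.length))
            ((List.replicate (2^seats.headI.length) (-1:Int)).set 0 0)) ) (fun x => x) with
         | some v => v | none => 0) := rfl
  have hB : maxStudents2_alt seats
      = (match PySem.List.max? ((seats.foldl
            (fun prev r => Bstep seats.headI.length prev (rowOf seats.headI.length r))
            (PySem.Dict.ofList [(0, 0)] : PySem.Dict Nat Int)).values) (fun x => x) with
         | some v => v | none => 0) := rfl
  rw [hA, hB]
  rw [dp0_eq _ hNpos, Afold_map]
  have hfm : seats.foldl
      (fun prev r => Bstep seats.headI.length prev (rowOf seats.headI.length r))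
      (PySem.Dict.ofList [(0, 0)] : PySem.Dict Nat Int)
      = (seats.map (rowOf seats.headI.length)).foldl (Bstep seats.headI.length)
          (PySem.Dict.ofList [(0, 0)] : PySem.Dict Nat Int) :=
    by rw [List.foldl_map]
  rw [hfm]
  have hbase : (PySem.Dict.ofList [(0, 0)] : PySem.Dict Nat Int).items
      = ((List.range (2^seats.headI.length)).filter
          (fun k => decide ((if k = 0 then (0:Int) else -1) ≠ -1))).map
          (fun k => (k, if k = 0 then (0:Int) else -1)) := by
    rw [base_items _ hNpos]
    rfl
  obtain ⟨hitems, h0⟩ := main_fold seats.headI.length (seats.map (rowOf seats.headI.length))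
    (fun j => if j = 0 then (0:Int) else -1) (PySem.Dict.ofList [(0, 0)])
    (by norm_num) (by intro k; by_cases hk : k = 0 <;> simp [hk]) hbase
  have hvals : ((seats.map (rowOf seats.headI.length)).foldl (Bstep seats.headI.length)
      (PySem.Dict.ofList [(0, 0)])).values
      = ((List.range (2^seats.headI.length)).filter
          (fun k => decide (((seats.map (rowOf seats.headI.length)).foldl
              (stepF (2^seats.headI.length)) (fun j => if j = 0 then (0:Int) else -1)) k ≠ -1))).map
          ((seats.map (rowOf seats.headI.length)).foldl (stepF (2^seats.headI.length))
              (fun j => if j = 0 then (0:Int) else -1)) := by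
    show ((seats.map (rowOf seats.headI.length)).foldl (Bstep seats.headI.length)
      (PySem.Dict.ofList [(0, 0)])).items.map Prod.snd = _
    rw [hitems, List.map_map]
    rfl
  rw [hvals]
  exact final_max (2^seats.headI.length) hNpos _ h0

-- ===== VERDICT (by name: the statement is the Claim_ definition above) =====
theorem maxStudents2_spec : Claim_equal_maxStudents2 := by
  intro seats _ _
  exact ports_eq seats
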